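-- pv_equiv track=rewrite | github.com/emidan19/deep-tempest | gr-tempest/python/TMDS_decoder.py | DecTMDS_pixel
-- ===== SOURCE A (Python) =====
-- def binarray_to_uint(binarray):
--
--     num = binarray[0]
--     for n in range(1,len(binarray)):
--         num = (num << 1) + binarray[n]
--     return num
--
-- def DecTMDS_pixel (D):
--     """10-bit pixel TMDS decoding
--
--     Inputs:
--     - D: binary list
--
--     Output:
--     - pix_out: 8-bit TMDS decoded pixel
--
--     """
--
--     if D[9]:
--         D[:8] = [not(val) for val in D[:8]]
--
--     Q = D.copy()[:8]
--
--     if D[8]: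
--         # for k in range(1,8):
--         #     Q[k] = D[k] ^ D[k-1]
--         Q[2] = D[2] ^ D[1]
--         Q[3] = D[3] ^ D[2]
--         Q[4] = D[4] ^ D[3]
--         Q[5] = D[5] ^ D[4]
--         Q[6] = D[6] ^ D[5]
--         Q[7] = D[7] ^ D[6]
--     else:
--         # for k in range(1,8):
--         #     Q[k] = not(D[k] ^ D[k-1])
--         Q[2] = not(D[2] ^ D[1])
--         Q[3] = not(D[3] ^ D[2])
--         Q[4] = not(D[4] ^ D[3])
--         Q[5] = not(D[5] ^ D[4])
--         Q[6] = not(D[6] ^ D[5])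
--         Q[7] = not(D[7] ^ D[6])
--
--     # Return pixel as uint
--     return binarray_to_uint(Q)
-- ===== SOURCE B (Python) =====
-- def DecTMDS_pixel(D):
--     """10-bit TMDS decode, bit-parallel: pack D[:8] into an int and decode
--     all six XOR/XNOR bits at once with integer bitwise operations."""
--     if D[9]:
--         D[:8] = [not v for v in D[:8]]
--     d = sum(bool(v) << (7 - i) for i, v in enumerate(D[:8]))
--     t = d ^ (d >> 1)
--     if not D[8]:
--         t ^= 0x3F
--     return (d & 0xC0) | (t & 0x3F)
-- ===== Notes on version B (the rewrite author's own statement) =====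
-- stated objective: alternative
-- what changed: Replaces the per-bit list construction (six unrolled XOR/XNOR assignments into a copied list, then a shift-add fold) with a bit-parallel integer decode: D[:8] is packed into one integer d and all six differential bits are computed at once as d ^ (d >> 1), XNOR by a 6-bit mask flip, then masked and recombined; the in-place inversion of D[:8] is kept.
import Mathlib
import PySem

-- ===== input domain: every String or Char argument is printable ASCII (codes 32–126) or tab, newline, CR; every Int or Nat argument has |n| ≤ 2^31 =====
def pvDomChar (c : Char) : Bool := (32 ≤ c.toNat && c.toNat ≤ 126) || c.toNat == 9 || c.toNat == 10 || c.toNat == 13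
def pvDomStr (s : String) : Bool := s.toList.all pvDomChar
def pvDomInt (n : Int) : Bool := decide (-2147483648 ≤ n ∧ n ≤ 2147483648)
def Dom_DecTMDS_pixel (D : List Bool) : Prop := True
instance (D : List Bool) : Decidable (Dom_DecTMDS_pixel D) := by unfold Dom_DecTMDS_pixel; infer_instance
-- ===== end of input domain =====

-- B replaces A's per-bit list decode (copy + six unrolled XOR/XNOR assignments + shift-add fold) by a bit-parallel
-- integer decode: pack D[:8] into one integer d and decode all six bits at once as d ^ (d >> 1), masked and recombined.
-- A mutates its argument D in place (inverts D[:8] when D[9]); B performs the same mutation; the Lean claim is about the return value only.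


def pvBoolInt (b : Bool) : Int := if b then 1 else 0

-- ===== PORT A =====
-- helper binarray_to_uint: num = b[0]; for n in range(1, len(b)): num = (num << 1) + b[n]
def binarray_to_uint (b : List Bool) : Int :=
  (PySem.List.pyRange 1 (PySem.List.len b) 1).foldl
    (fun num n => (num <<< 1) + pvBoolInt (PySem.List.pyGetD b n false))
    (pvBoolInt (PySem.List.pyGetD b 0 false))

def DecTMDS_pixel (D : List Bool) : Int :=
  -- if D[9]: D[:8] = [not(val) for val in D[:8]]
  let D := if PySem.List.pyGetD D 9 false then
             (PySem.List.slice D none (some 8)).map (fun v => !v) ++ D.drop 8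
           else D
  -- Q = D.copy()[:8]
  let Q := PySem.List.slice D none (some 8)
  let Q := if PySem.List.pyGetD D 8 false then
      let Q := PySem.List.pySetD Q 2 ((PySem.List.pyGetD D 2 false) ^^ (PySem.List.pyGetD D 1 false))
      let Q := PySem.List.pySetD Q 3 ((PySem.List.pyGetD D 3 false) ^^ (PySem.List.pyGetD D 2 false))
      let Q := PySem.List.pySetD Q 4 ((PySem.List.pyGetD D 4 false) ^^ (PySem.List.pyGetD D 3 false))
      let Q := PySem.List.pySetD Q 5 ((PySem.List.pyGetD D 5 false) ^^ (PySem.List.pyGetD D 4 false))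
      let Q := PySem.List.pySetD Q 6 ((PySem.List.pyGetD D 6 false) ^^ (PySem.List.pyGetD D 5 false))
      let Q := PySem.List.pySetD Q 7 ((PySem.List.pyGetD D 7 false) ^^ (PySem.List.pyGetD D 6 false))
      Q
    else
      let Q := PySem.List.pySetD Q 2 (!((PySem.List.pyGetD D 2 false) ^^ (PySem.List.pyGetD D 1 false)))
      let Q := PySem.List.pySetD Q 3 (!((PySem.List.pyGetD D 3 false) ^^ (PySem.List.pyGetD D 2 false)))
      let Q := PySem.List.pySetD Q 4 (!((PySem.List.pyGetD D 4 false) ^^ (PySem.List.pyGetD D 3 false)))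
      let Q := PySem.List.pySetD Q 5 (!((PySem.List.pyGetD D 5 false) ^^ (PySem.List.pyGetD D 4 false)))
      let Q := PySem.List.pySetD Q 6 (!((PySem.List.pyGetD D 6 false) ^^ (PySem.List.pyGetD D 5 false)))
      let Q := PySem.List.pySetD Q 7 (!((PySem.List.pyGetD D 7 false) ^^ (PySem.List.pyGetD D 6 false)))
      Q
  binarray_to_uint Q

-- ===== PORT B =====
-- pack D[:8] into d (sum over enumerate), then decode all six differential bits at once: t = d ^ (d >> 1),
-- XNOR = flip the low six bits (t ^ 0x3F), result = (d & 0xC0) | (t & 0x3F).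
def DecTMDS_pixel_alt (D : List Bool) : Int :=
  let D := if PySem.List.pyGetD D 9 false then
             (PySem.List.slice D none (some 8)).map (fun v => !v) ++ D.drop 8
           else D
  let d : Int := ((PySem.List.enumerate (PySem.List.slice D none (some 8))).map
      (fun p => (pvBoolInt p.2) <<< ((7 - p.1).toNat))).sum
  let t := PySem.Int.bxor d (d >>> (1 : Nat))
  let t := if PySem.List.pyGetD D 8 false then t else PySem.Int.bxor t 63
  PySem.Int.bor (PySem.Int.band d 192) (PySem.Int.band t 63)

-- ===== PRECONDITION & SPEC =====
-- Pre_: A indexes D[8] and D[9], so Python raises IndexError on lists shorter than 10.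
def Pre_DecTMDS_pixel (D : List Bool) : Prop := 10 ≤ D.length
instance (D : List Bool) : Decidable (Pre_DecTMDS_pixel D) := by unfold Pre_DecTMDS_pixel; infer_instance
def pvWitness_DecTMDS_pixel : List Bool :=
  [true, false, true, true, false, false, true, false, true, false]
def Spec_DecTMDS_pixel (D : List Bool) (out : Int) : Prop := out = DecTMDS_pixel_alt D
instance (D : List Bool) (out : Int) : Decidable (Spec_DecTMDS_pixel D out) := by unfold Spec_DecTMDS_pixel; infer_instance

-- ===== CLAIM =====
def Claim_equal_DecTMDS_pixel : Prop := ∀ (D : List Bool), Dom_DecTMDS_pixel D → Pre_DecTMDS_pixel D → Spec_DecTMDS_pixel D (DecTMDS_pixel D)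

-- ===== LEMMAS AND PROOFS =====
-- Both ports depend only on the first ten elements; destructure, rewrite away the tail, then decide over the ten bits.
theorem pv_slice8 {a : Type} (x0 x1 x2 x3 x4 x5 x6 x7 : a) (ys : List a) :
    PySem.List.slice (x0::x1::x2::x3::x4::x5::x6::x7::ys) none (some 8) = [x0,x1,x2,x3,x4,x5,x6,x7] := by
  simp [pysem]

theorem pv_get1 {a : Type} (x0 x1 : a) (ys : List a) (d : a) :
    PySem.List.pyGetD (x0::x1::ys) 1 d = x1 := by simp [pysem]
theorem pv_get2 {a : Type} (x0 x1 x2 : a) (ys : List a) (d : a) :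
    PySem.List.pyGetD (x0::x1::x2::ys) 2 d = x2 := by simp [pysem]
theorem pv_get3 {a : Type} (x0 x1 x2 x3 : a) (ys : List a) (d : a) :
    PySem.List.pyGetD (x0::x1::x2::x3::ys) 3 d = x3 := by simp [pysem]
theorem pv_get4 {a : Type} (x0 x1 x2 x3 x4 : a) (ys : List a) (d : a) :
    PySem.List.pyGetD (x0::x1::x2::x3::x4::ys) 4 d = x4 := by simp [pysem]
theorem pv_get5 {a : Type} (x0 x1 x2 x3 x4 x5 : a) (ys : List a) (d : a) :
    PySem.List.pyGetD (x0::x1::x2::x3::x4::x5::ys) 5 d = x5 := by simp [pysem]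
theorem pv_get6 {a : Type} (x0 x1 x2 x3 x4 x5 x6 : a) (ys : List a) (d : a) :
    PySem.List.pyGetD (x0::x1::x2::x3::x4::x5::x6::ys) 6 d = x6 := by simp [pysem]
theorem pv_get7 {a : Type} (x0 x1 x2 x3 x4 x5 x6 x7 : a) (ys : List a) (d : a) :
    PySem.List.pyGetD (x0::x1::x2::x3::x4::x5::x6::x7::ys) 7 d = x7 := by simp [pysem]

theorem pv_get8 {a : Type} (x0 x1 x2 x3 x4 x5 x6 x7 x8 : a) (ys : List a) (d : a) :
    PySem.List.pyGetD (x0::x1::x2::x3::x4::x5::x6::x7::x8::ys) 8 d = x8 := by simp [pysem]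
theorem pv_get9 {a : Type} (x0 x1 x2 x3 x4 x5 x6 x7 x8 x9 : a) (ys : List a) (d : a) :
    PySem.List.pyGetD (x0::x1::x2::x3::x4::x5::x6::x7::x8::x9::ys) 9 d = x9 := by simp [pysem]

theorem pv_A_take10 (d0 d1 d2 d3 d4 d5 d6 d7 d8 d9 : Bool) (rest : List Bool) :
    DecTMDS_pixel (d0::d1::d2::d3::d4::d5::d6::d7::d8::d9::rest)
      = DecTMDS_pixel (d0::d1::d2::d3::d4::d5::d6::d7::d8::d9::[]) := by
  simp only [DecTMDS_pixel, pv_get9]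
  cases d9 <;>
    simp only [Bool.false_eq_true, if_false, if_true, List.map, List.cons_append, List.nil_append,
      List.drop_succ_cons, List.drop_zero, pv_slice8, pv_get1, pv_get2, pv_get3, pv_get4, pv_get5, pv_get6, pv_get7, pv_get8]

theorem pv_B_take10 (d0 d1 d2 d3 d4 d5 d6 d7 d8 d9 : Bool) (rest : List Bool) :
    DecTMDS_pixel_alt (d0::d1::d2::d3::d4::d5::d6::d7::d8::d9::rest)
      = DecTMDS_pixel_alt (d0::d1::d2::d3::d4::d5::d6::d7::d8::d9::[]) := by
  simp only [DecTMDS_pixel_alt, pv_get9]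
  cases d9 <;>
    simp only [Bool.false_eq_true, if_false, if_true, List.map, List.cons_append, List.nil_append,
      List.drop_succ_cons, List.drop_zero, pv_slice8, pv_get8]

set_option maxHeartbeats 2000000 in
theorem pv_main10 : ∀ (d0 d1 d2 d3 d4 d5 d6 d7 d8 d9 : Bool),
    DecTMDS_pixel [d0,d1,d2,d3,d4,d5,d6,d7,d8,d9]
      = DecTMDS_pixel_alt [d0,d1,d2,d3,d4,d5,d6,d7,d8,d9] := by decide

-- ===== VERDICT =====
theorem DecTMDS_pixel_spec : Claim_equal_DecTMDS_pixel := by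
  intro D _ hpre
  unfold Pre_DecTMDS_pixel at hpre
  match D, hpre with
  | d0 :: d1 :: d2 :: d3 :: d4 :: d5 :: d6 :: d7 :: d8 :: d9 :: rest, _ =>
    show DecTMDS_pixel _ = DecTMDS_pixel_alt _
    rw [pv_A_take10, pv_B_take10]
    exact pv_main10 d0 d1 d2 d3 d4 d5 d6 d7 d8 d9
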